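-- pv_equiv track=rewrite | github.com/Josh-Tang112/AMQ | bloom.py | get_k_helper
-- ===== SOURCE A (Python) =====
-- def get_k_helper(alpha, strlen, k_length):
--     if strlen == 1:
--         return alpha
--     else:
--         val = get_k_helper(alpha,strlen-1,k_length)
--         ret = []
--         c = 0
--         for i in val:
--             for j in alpha:
--                 ret.append(i + j)
--                 c+=1
--                 if c == k_length:
--                     return ret
--         return ret
-- ===== SOURCE B (Python) =====
-- def get_k_helper(alpha, strlen, k_length):
--     if strlen == 1:
--         return alpha
--     b = len(alpha)
--     total = b ** strlen
--     n = total if k_length <= 0 else min(k_length, total)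
--     out = []
--     for m in range(n):
--         digits = []
--         x = m
--         for _ in range(strlen):
--             digits.append(alpha[x % b])
--             x //= b
--         out.append(''.join(reversed(digits)))
--     return out
-- ===== Notes on version B (the rewrite author's own statement) =====
-- stated objective: faster
-- what changed: Replaces A's strlen-deep recursion that rebuilds (and re-truncates) the cross product at every level with a single pass that decodes each of the first n = min(k_length, |alpha|^strlen) indices (all of them when k_length <= 0) as a fixed-width base-|alpha| numeral.
import Mathlib
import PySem

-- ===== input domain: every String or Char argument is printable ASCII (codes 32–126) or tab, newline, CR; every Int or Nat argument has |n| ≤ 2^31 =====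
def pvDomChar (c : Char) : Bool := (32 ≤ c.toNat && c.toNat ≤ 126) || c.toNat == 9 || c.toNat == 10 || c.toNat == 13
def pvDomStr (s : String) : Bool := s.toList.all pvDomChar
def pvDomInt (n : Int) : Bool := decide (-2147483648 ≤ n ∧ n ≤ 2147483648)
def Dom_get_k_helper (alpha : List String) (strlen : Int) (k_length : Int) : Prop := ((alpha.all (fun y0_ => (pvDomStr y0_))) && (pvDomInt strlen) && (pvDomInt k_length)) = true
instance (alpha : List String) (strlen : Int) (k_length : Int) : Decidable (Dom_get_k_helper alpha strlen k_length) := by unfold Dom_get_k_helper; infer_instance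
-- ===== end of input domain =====

-- B replaces A's per-level recursive cross-product building by direct base-|alpha| decoding of
-- each output index in one pass (objective: faster).

-- ===== PORT A =====
-- inner `for j in alpha` loop: returns (ret, c, earlyReturn?)
def pvInnerA (k : Int) (i : String) : List String → List String → Int → (List String × Int × Bool)
  | [], ret, c => (ret, c, false)
  | j :: js, ret, c =>
      let ret' := ret ++ [i ++ j]
      let c' := c + 1
      if c' = k then (ret', c', true) else pvInnerA k i js ret' c'

-- outer `for i in val` loop
def pvOuterA (alpha : List String) (k : Int) : List String → List String → Int → List String
  | [], ret, _ => ret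
  | i :: is, ret, c =>
      match pvInnerA k i alpha ret c with
      | (ret', _, true) => ret'
      | (ret', c', false) => pvOuterA alpha k is ret' c'

-- recursion on strlen, as a Nat (Python diverges for strlen ≤ 0: excluded by Pre_; fuel 0 is unreachable there)
def pvGoA (alpha : List String) (k : Int) : Nat → List String
  | 0 => []
  | 1 => alpha
  | n + 2 => pvOuterA alpha k (pvGoA alpha k (n + 1)) [] 0

def get_k_helper (alpha : List String) (strlen : Int) (k_length : Int) : List String :=
  pvGoA alpha k_length strlen.toNat

-- ===== PORT B =====
-- the inner digit loop of Source B: `for _ in range(strlen): digits.append(alpha[x % b]); x //= b`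
-- indexing alpha[x % b] is exact via getD: whenever the loop runs, b = |alpha| > 0 and 0 ≤ x % b < b
def pvDigitsB (alpha : List String) (b : Int) : Nat → Int → List String → List String
  | 0, _, ds => ds
  | t + 1, x, ds =>
      pvDigitsB alpha b t (PySem.Int.floordiv x b) (ds ++ [alpha.getD (PySem.Int.mod x b).toNat ""])

def get_k_helper_alt (alpha : List String) (strlen : Int) (k_length : Int) : List String :=
  if strlen = 1 then alpha
  else
    let b : Int := alpha.length
    let total : Int := b ^ strlen.toNat   -- b ** strlen; strlen ≥ 2 on Pre_, so toNat is exact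
    let n : Int := if k_length ≤ 0 then total else min k_length total
    (PySem.List.pyRange 0 n 1).map
      (fun m => String.join (pvDigitsB alpha b strlen.toNat m []).reverse)

-- ===== PRECONDITION & SPEC =====
-- Pre_: strlen ≥ 1; for strlen ≤ 0 Python A recurses without bound (RecursionError)
def Pre_get_k_helper (alpha : List String) (strlen : Int) (k_length : Int) : Prop := 1 ≤ strlen
instance (alpha : List String) (strlen : Int) (k_length : Int) : Decidable (Pre_get_k_helper alpha strlen k_length) := by unfold Pre_get_k_helper; infer_instance

def pvWitness_get_k_helper : List String × Int × Int := (["a", "b"], 3, 5)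

def Spec_get_k_helper (alpha : List String) (strlen : Int) (k_length : Int) (out : List String) : Prop := out = get_k_helper_alt alpha strlen k_length
instance (alpha : List String) (strlen : Int) (k_length : Int) (out : List String) : Decidable (Spec_get_k_helper alpha strlen k_length out) := by unfold Spec_get_k_helper; infer_instance

-- ===== CLAIM (what is proved, stated in full; the proofs are below) =====
def Claim_equal_get_k_helper : Prop := ∀ (alpha : List String) (strlen : Int) (k_length : Int), Dom_get_k_helper alpha strlen k_length → Pre_get_k_helper alpha strlen k_length → Spec_get_k_helper alpha strlen k_length (get_k_helper alpha strlen k_length)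

-- ===== LEMMAS AND PROOFS =====

-- the full cross product of n+1 factors of alpha, lexicographic by index
def pvProd1 (l alpha : List String) : List String := l.flatMap (fun i => alpha.map (fun j => i ++ j))

def pvFull (alpha : List String) : Nat → List String
  | 0 => alpha
  | n + 1 => pvProd1 (pvFull alpha n) alpha

-- first k elements if k ≥ 1, the whole list if k ≤ 0
def pvTakeK (k : Int) (l : List String) : List String := if k ≤ 0 then l else l.take k.toNat

theorem pvInnerA_spec (k : Int) (i : String) (js : List String) : ∀ (ret : List String) (c : Int),
    pvInnerA k i js ret c =
      if 0 < k - c ∧ k - c ≤ (js.length : Int) then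
        (ret ++ (js.take (k - c).toNat).map (fun j => i ++ j), k, true)
      else
        (ret ++ js.map (fun j => i ++ j), c + js.length, false) := by
  induction js with
  | nil =>
    intro ret c
    simp [pvInnerA]
  | cons j js ih =>
    intro ret c
    simp only [pvInnerA]
    by_cases hk : c + 1 = k
    · have hcond : 0 < k - c ∧ k - c ≤ ((j :: js).length : Int) := by simp; omega
      rw [if_pos hk, if_pos hcond]
      have : (k - c).toNat = 1 := by omega
      simp [this, hk]
    · rw [if_neg hk, ih]
      have hiff : (0 < k - (c+1) ∧ k - (c+1) ≤ (js.length : Int)) ↔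
          (0 < k - c ∧ k - c ≤ ((j :: js).length : Int)) := by simp; omega
      by_cases hc2 : 0 < k - (c+1) ∧ k - (c+1) ≤ (js.length : Int)
      · rw [if_pos hc2, if_pos (hiff.mp hc2)]
        have ht : (k - c).toNat = (k - (c+1)).toNat + 1 := by omega
        simp [ht]
      · rw [if_neg hc2, if_neg (fun h => hc2 (hiff.mpr h))]
        simp
        omega

theorem pvTakeK_append_of_lt (k : Int) (xs ys : List String) (h : (xs.length : Int) < k) :
    pvTakeK k (xs ++ ys) = xs ++ pvTakeK (k - xs.length) ys := by
  unfold pvTakeK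
  rw [if_neg (by omega), if_neg (by omega)]
  rw [List.take_append, List.take_of_length_le (by omega)]
  have h2 : k.toNat - xs.length = (k - (xs.length:Int)).toNat := by omega
  rw [h2]

theorem pvOuterA_spec (alpha : List String) (k : Int) (val : List String) : ∀ (ret : List String) (c : Int),
    0 ≤ c → (k ≤ 0 ∨ c < k) →
    pvOuterA alpha k val ret c = ret ++ pvTakeK (k - c) (pvProd1 val alpha) := by
  induction val with
  | nil =>
    intro ret c hc hinv
    simp [pvOuterA, pvProd1, pvTakeK]
  | cons i is ih =>
    intro ret c hc hinv
    simp only [pvOuterA, pvInnerA_spec]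
    by_cases hcond : 0 < k - c ∧ k - c ≤ (alpha.length : Int)
    · rw [if_pos hcond]
      dsimp only
      simp only [pvProd1, List.flatMap_cons, pvTakeK]
      rw [if_neg (by omega : ¬ (k - c ≤ 0))]
      rw [List.take_append]
      have h0 : (k - c).toNat - (List.map (fun j => i ++ j) alpha).length = 0 := by
        simp
        omega
      rw [h0]
      simp [List.map_take]
    · rw [if_neg hcond]
      dsimp only
      rw [ih (ret ++ List.map (fun j => i ++ j) alpha) (c + alpha.length) (by omega) (by omega)]
      simp only [pvProd1, List.flatMap_cons]
      by_cases hk : k ≤ 0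
      · unfold pvTakeK
        rw [if_pos (by omega : k - (c + (alpha.length:Int)) ≤ 0), if_pos (by omega : k - c ≤ 0)]
        simp
      · have hgt : ((List.map (fun j => i ++ j) alpha).length : Int) < k - c := by
          simp
          omega
        rw [pvTakeK_append_of_lt _ _ _ hgt]
        have he : k - c - ((List.map (fun j => i ++ j) alpha).length : Int) = k - (c + alpha.length) := by
          simp
          ring
        rw [he]
        simp

theorem pvProd1_take (alpha : List String) (l : List String) : ∀ (t : Nat),
    pvProd1 (l.take t) alpha = (pvProd1 l alpha).take (t * alpha.length) := by
  induction l with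
  | nil => intro t; simp [pvProd1]
  | cons i is ih =>
    intro t
    cases t with
    | zero => simp [pvProd1]
    | succ t =>
      simp only [List.take_succ_cons, pvProd1, List.flatMap_cons]
      rw [List.take_append]
      congr 1
      · exact (List.take_of_length_le (by simp [Nat.succ_mul])).symm
      · have h1 : (t + 1) * alpha.length - (List.map (fun j => i ++ j) alpha).length = t * alpha.length := by
          simp [Nat.succ_mul]
        rw [h1]
        have := ih t
        simpa only [pvProd1] using this

theorem pvTakeK_prod1_takeK (k : Int) (l alpha : List String) :
    pvTakeK k (pvProd1 (pvTakeK k l) alpha) = pvTakeK k (pvProd1 l alpha) := by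
  by_cases hk : k ≤ 0
  · simp [pvTakeK, hk]
  · by_cases ha : alpha = []
    · subst ha
      have hnil : ∀ (m : List String), pvProd1 m [] = [] := by
        intro m
        simp [pvProd1]
      rw [hnil, hnil]
    · simp only [pvTakeK, if_neg hk]
      rw [pvProd1_take, List.take_take]
      have hlen : 0 < alpha.length := by
        cases alpha
        · exact absurd rfl ha
        · simp
      have : min k.toNat (k.toNat * alpha.length) = k.toNat := by
        have := Nat.le_mul_of_pos_right k.toNat hlen
        omega
      rw [this]

theorem pvGoA_spec (alpha : List String) (k : Int) : ∀ (n : Nat),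
    pvGoA alpha k (n + 2) = pvTakeK k (pvFull alpha (n + 1)) := by
  intro n
  induction n with
  | zero =>
    rw [pvGoA, pvOuterA_spec alpha k _ [] 0 (le_refl 0) (by omega)]
    simp [pvGoA, pvFull]
  | succ n ih =>
    rw [pvGoA, pvOuterA_spec alpha k _ [] 0 (le_refl 0) (by omega)]
    rw [ih, sub_zero, pvTakeK_prod1_takeK]
    simp only [List.nil_append]
    rfl

theorem pvFull_length (alpha : List String) : ∀ (n : Nat),
    (pvFull alpha n).length = alpha.length ^ (n + 1) := by
  intro n
  induction n with
  | zero => simp [pvFull]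
  | succ n ih =>
    simp only [pvFull, pvProd1, List.length_flatMap]
    simp [ih, pow_succ]

theorem pvProd1_getD (alpha : List String) (l : List String) : ∀ (m : Nat),
    m < l.length * alpha.length →
    (pvProd1 l alpha).getD m "" = l.getD (m / alpha.length) "" ++ alpha.getD (m % alpha.length) "" := by
  induction l with
  | nil => intro m hm; simp at hm
  | cons i is ih =>
    intro m hm
    have hm' : m < is.length * alpha.length + alpha.length := by
      simpa [Nat.succ_mul] using hm
    have hb : 0 < alpha.length := by
      rcases Nat.eq_zero_or_pos alpha.length with h | h
      · rw [h] at hm'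
        simp at hm'
      · exact h
    simp only [pvProd1, List.flatMap_cons]
    by_cases hm1 : m < alpha.length
    · rw [List.getD_append _ _ _ _ (by simpa using hm1)]
      rw [Nat.div_eq_of_lt hm1, Nat.mod_eq_of_lt hm1]
      rw [List.getD_eq_getElem _ _ (by simpa using hm1), List.getElem_map,
        ← List.getD_eq_getElem alpha (d := "") hm1]
      simp
    · rw [Nat.not_lt] at hm1
      rw [List.getD_append_right _ _ _ _ (by simpa using hm1)]
      have hrec := ih (m - alpha.length) (by omega)
      simp only [pvProd1] at hrec
      simp only [List.length_map]
      rw [hrec]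
      have hdiv : m / alpha.length = (m - alpha.length) / alpha.length + 1 := by
        rw [Nat.div_eq]
        simp [hb, hm1]
      have hmod : m % alpha.length = (m - alpha.length) % alpha.length := Nat.mod_eq_sub_mod hm1
      rw [hdiv, ← hmod]
      simp

theorem pvDigitsB_acc (alpha : List String) (b : Int) : ∀ (t : Nat) (x : Int) (ds : List String),
    pvDigitsB alpha b t x ds = ds ++ pvDigitsB alpha b t x [] := by
  intro t
  induction t with
  | zero => intro x ds; simp [pvDigitsB]
  | succ t ih =>
    intro x ds
    rw [pvDigitsB, pvDigitsB]
    rw [ih _ (ds ++ [alpha.getD (PySem.Int.mod x b).toNat ""]),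
        ih _ ([] ++ [alpha.getD (PySem.Int.mod x b).toNat ""])]
    simp

theorem pvJoin_append (l : List String) (s : String) :
    String.join (l ++ [s]) = String.join l ++ s := by
  simp [String.join, List.foldl_append]

theorem pvDecode_spec (alpha : List String) : ∀ (c : Nat) (x : Int),
    0 ≤ x → x < (alpha.length : Int) ^ (c + 1) →
    String.join (pvDigitsB alpha (alpha.length : Int) (c + 1) x []).reverse
      = (pvFull alpha c).getD x.toNat "" := by
  intro c
  induction c with
  | zero =>
    intro x hx hxu
    have hxu1 : x < (alpha.length : Int) := by simpa using hxu
    have hb : 0 < (alpha.length : Int) := by omega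
    rw [pvDigitsB, pvDigitsB]
    simp only [List.nil_append, List.reverse_singleton]
    rw [PySem.Int.mod_eq_emod_of_pos hb, Int.emod_eq_of_lt hx hxu1]
    simp [String.join, pvFull]
  | succ c ih =>
    intro x hx hxu
    have hb : 0 < (alpha.length : Int) := by
      by_contra h
      have h0 : (alpha.length : Int) = 0 := by omega
      rw [h0] at hxu
      simp at hxu
      omega
    have hbn : 0 < alpha.length := by exact_mod_cast hb
    rw [pvDigitsB, pvDigitsB_acc]
    simp only [List.nil_append, List.reverse_append, List.reverse_singleton]
    have hfd : PySem.Int.floordiv x (alpha.length : Int) = x / (alpha.length : Int) :=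
      PySem.Int.floordiv_eq_ediv_of_pos hb
    have hx' : 0 ≤ x / (alpha.length : Int) := Int.ediv_nonneg hx (le_of_lt hb)
    have hxu' : x / (alpha.length : Int) < (alpha.length : Int) ^ (c + 1) := by
      rw [Int.ediv_lt_iff_lt_mul hb]
      calc x < (alpha.length : Int) ^ (c + 1 + 1) := hxu
        _ = (alpha.length : Int) ^ (c + 1) * alpha.length := by ring
    rw [hfd, pvJoin_append, ih _ hx' hxu']
    have hmlt : x.toNat < (pvFull alpha c).length * alpha.length := by
      rw [pvFull_length]
      have : x < ((alpha.length ^ (c + 1) * alpha.length : Nat) : Int) := by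
        push_cast
        calc x < (alpha.length : Int) ^ (c + 1 + 1) := hxu
          _ = (alpha.length : Int) ^ (c + 1) * alpha.length := by ring
      omega
    rw [show pvFull alpha (c + 1) = pvProd1 (pvFull alpha c) alpha from rfl]
    rw [pvProd1_getD alpha _ x.toNat hmlt]
    obtain ⟨y, rfl⟩ : ∃ y : Nat, x = (y : Int) := ⟨x.toNat, (Int.toNat_of_nonneg hx).symm⟩
    congr 2
    rw [PySem.Int.mod_eq_emod_of_pos hb]
    rw [show ((y : Int) % (alpha.length : Int)) = ((y % alpha.length : Nat) : Int) from
      (Int.natCast_mod y alpha.length).symm]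
    exact Int.toNat_natCast _

theorem pvMap_range_getD (L : List String) : ∀ (n : Nat), n ≤ L.length →
    (List.range n).map (fun i => L.getD i "") = L.take n := by
  intro n hn
  apply List.ext_getElem
  · simp [hn]
  · intro i h1 h2
    simp only [List.length_take] at h2
    have hi : i < L.length := by omega
    simp only [List.getElem_map, List.getElem_range, List.getElem_take]
    rw [List.getD_eq_getElem _ _ hi]

theorem pvAlt_spec (alpha : List String) (strlen k : Int) (h : 2 ≤ strlen) :
    get_k_helper_alt alpha strlen k = pvTakeK k (pvFull alpha (strlen.toNat - 1)) := by
  rw [get_k_helper_alt, if_neg (by omega : ¬ strlen = 1)]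
  simp only []
  set s := strlen.toNat with hs
  have hs2 : 2 ≤ s := by omega
  set b : Int := (alpha.length : Int) with hbdef
  set total : Int := b ^ s with htot
  have htotnn : 0 ≤ total := by positivity
  set n : Int := if k ≤ 0 then total else min k total with hn
  have hnn : 0 ≤ n := by
    rw [hn]
    split_ifs with hk
    · exact htotnn
    · exact le_min (by omega) htotnn
  have hntot : n ≤ total := by
    rw [hn]
    split_ifs with hk
    · exact le_refl _
    · exact min_le_right _ _
  have hlenfull : (pvFull alpha (s - 1)).length = alpha.length ^ s := by
    rw [pvFull_length]
    congr 1
    omega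
  have hnle : n.toNat ≤ (pvFull alpha (s - 1)).length := by
    rw [hlenfull]
    have : total = ((alpha.length ^ s : Nat) : Int) := by
      rw [htot, hbdef]
      push_cast
      rfl
    omega
  rw [PySem.List.pyRange_one, List.map_map]
  have hmape : ((List.range (n - 0).toNat).map ((fun m => String.join (pvDigitsB alpha b s m []).reverse) ∘ (fun kk : Nat => (0 : Int) + kk)))
      = (List.range n.toNat).map (fun i => (pvFull alpha (s - 1)).getD i "") := by
    rw [show n - 0 = n from by ring]
    apply List.map_congr_left
    intro kk hkk
    simp only [Function.comp, zero_add]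
    have hkk' : kk < n.toNat := List.mem_range.mp hkk
    have h1 : (0 : Int) ≤ (kk : Int) := by omega
    have h2 : (kk : Int) < b ^ ((s - 1) + 1) := by
      have : ((s - 1) + 1) = s := by omega
      rw [this]
      have : (kk : Int) < n := by omega
      omega
    have := pvDecode_spec alpha (s - 1) (kk : Int) h1 (by exact h2)
    rw [show (s - 1) + 1 = s from by omega] at this
    rw [this]
    simp
  rw [hmape, pvMap_range_getD _ _ hnle]
  rw [pvTakeK]
  split_ifs with hk
  · have hnt : n = total := by rw [hn, if_pos hk]
    rw [List.take_of_length_le]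
    rw [hlenfull]
    have : total = ((alpha.length ^ s : Nat) : Int) := by
      rw [htot, hbdef]; push_cast; rfl
    omega
  · have hnmin : n = min k total := by rw [hn, if_neg hk]
    have htl : total = ((pvFull alpha (s-1)).length : Int) := by
      rw [hlenfull, htot, hbdef]; push_cast; rfl
    by_cases hkt : k ≤ total
    · have : n = k := by rw [hnmin]; omega
      rw [this]
    · have : n = total := by rw [hnmin]; omega
      rw [this, htl]
      rw [Int.toNat_natCast, List.take_length]
      rw [List.take_of_length_le]
      omega

-- ===== VERDICT (by name: the statement is the Claim_ definition above) =====
theorem get_k_helper_spec : Claim_equal_get_k_helper := by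
  intro alpha strlen k _ hpre
  unfold Pre_get_k_helper at hpre
  unfold Spec_get_k_helper get_k_helper
  by_cases h1 : strlen = 1
  · subst h1
    simp [get_k_helper_alt, pvGoA]
  · have h2 : 2 ≤ strlen := by omega
    rw [pvAlt_spec alpha strlen k h2]
    have hs : strlen.toNat = (strlen.toNat - 2) + 2 := by omega
    rw [hs, pvGoA_spec]
    have he : strlen.toNat - 2 + 2 - 1 = strlen.toNat - 2 + 1 := by omega
    rw [he]
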